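-- pv_equiv track=rewrite | github.com/TTTPOB/epubforge | src/epubforge/vlm_reader.py | _group_pages
-- ===== SOURCE A (Python) =====
-- def _group_pages(complex_pages: list[int], table_pages: set[int]) -> list[list[int]]:
--     """Merge consecutive complex pages that both have tables (cross-page table heuristic)."""
--     if not complex_pages:
--         return []
--     groups: list[list[int]] = [[complex_pages[0]]]
--     for prev, curr in zip(complex_pages, complex_pages[1:]):
--         if curr == prev + 1 and prev in table_pages and curr in table_pages:
--             groups[-1].append(curr)
--         else:
--             groups.append([curr])
--     return groups
-- ===== SOURCE B (Python) =====
-- def _group_pages(complex_pages: list[int], table_pages: set[int]) -> list[list[int]]: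
--     """Build the grouping back-to-front: scan the pages in reverse, keeping the groups
--     in reverse order with each group reversed (so all updates are O(1) appends), then
--     undo both reversals at the end."""
--     groups_rev: list[list[int]] = []  # groups in reverse order, each group reversed
--     for x in reversed(complex_pages):
--         if groups_rev and groups_rev[-1][-1] == x + 1 and x in table_pages and groups_rev[-1][-1] in table_pages:
--             groups_rev[-1].append(x)
--         else:
--             groups_rev.append([x])
--     return [g[::-1] for g in groups_rev[::-1]]
-- ===== Notes on version B (the rewrite author's own statement) =====
-- stated objective: alternative
-- what changed: B builds the grouping back-to-front: a reverse scan accumulates the groups in reverse order with each group reversed, and a final reversal pass restores the order, instead of A's forward zip(pages, pages[1:]) loop that appends to the last group.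
import Mathlib
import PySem

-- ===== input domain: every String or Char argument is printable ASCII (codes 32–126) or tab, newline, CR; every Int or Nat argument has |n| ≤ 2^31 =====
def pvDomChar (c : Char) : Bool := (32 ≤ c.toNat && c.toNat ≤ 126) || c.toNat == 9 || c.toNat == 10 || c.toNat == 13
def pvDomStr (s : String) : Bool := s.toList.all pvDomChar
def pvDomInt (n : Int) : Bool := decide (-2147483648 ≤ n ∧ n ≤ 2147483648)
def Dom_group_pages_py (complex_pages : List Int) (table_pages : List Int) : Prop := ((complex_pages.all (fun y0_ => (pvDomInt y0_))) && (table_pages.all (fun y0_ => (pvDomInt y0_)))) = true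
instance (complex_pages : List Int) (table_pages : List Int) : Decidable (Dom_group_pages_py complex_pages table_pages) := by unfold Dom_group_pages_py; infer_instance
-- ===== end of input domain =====

-- B builds the grouping back-to-front (reverse scan keeping reversed groups, undone by a
-- final reversal pass) instead of A's forward append-to-last loop; objective: alternative.


-- ===== PORT A =====
-- loop body of A: merge curr into the last group, or start a new group
def pvStepA (tp : List Int) (groups : List (List Int)) (pc : Int × Int) : List (List Int) :=
  if pc.2 = pc.1 + 1 ∧ pc.1 ∈ tp ∧ pc.2 ∈ tp then
    groups.dropLast ++ [groups.getLast! ++ [pc.2]]   -- groups[-1].append(curr)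
  else
    groups ++ [[pc.2]]

def group_pages_py (complex_pages : List Int) (table_pages : List Int) : List (List Int) :=
  match complex_pages with
  | [] => []
  | c0 :: _ =>
    -- for prev, curr in zip(complex_pages, complex_pages[1:])
    (complex_pages.zip (PySem.List.slice complex_pages (some 1) none)).foldl
      (pvStepA table_pages) [[c0]]

-- ===== PORT B =====
-- loop body of B: groups_rev holds the groups in reverse order, each group reversed;
-- groups_rev[-1] → getLast!, groups_rev[-1][-1] → getLast!.getLast!, .append → ++ [·]
def pvStepB (tp : List Int) (acc : List (List Int)) (x : Int) : List (List Int) :=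
  if acc ≠ [] ∧ acc.getLast!.getLast! = x + 1 ∧ x ∈ tp ∧ acc.getLast!.getLast! ∈ tp then
    acc.dropLast ++ [acc.getLast! ++ [x]]
  else
    acc ++ [[x]]

-- reversed(xs) and xs[::-1] both port to List.reverse (PySem.List.slice?_none_none_neg_one)
def group_pages_py_alt (complex_pages : List Int) (table_pages : List Int) : List (List Int) :=
  ((complex_pages.reverse.foldl (pvStepB table_pages) []).reverse).map (fun g => g.reverse)

-- ===== PRECONDITION & SPEC =====
def Spec_group_pages_py (complex_pages : List Int) (table_pages : List Int) (out : List (List Int)) : Prop := out = group_pages_py_alt complex_pages table_pages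
instance (complex_pages : List Int) (table_pages : List Int) (out : List (List Int)) : Decidable (Spec_group_pages_py complex_pages table_pages out) := by unfold Spec_group_pages_py; infer_instance

-- ===== CLAIM (what is proved, stated in full; the proofs are below) =====
def Claim_equal_group_pages_py : Prop := ∀ (complex_pages : List Int) (table_pages : List Int), Dom_group_pages_py complex_pages table_pages → Spec_group_pages_py complex_pages table_pages (group_pages_py complex_pages table_pages)

-- ===== LEMMAS AND PROOFS =====

-- canonical head-first recursion both ports are reduced to
def pvGrp (tp : List Int) (x : Int) (groups : List (List Int)) : List (List Int) :=
  match groups with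
  | (y :: g) :: gs =>
    if y = x + 1 ∧ x ∈ tp ∧ y ∈ tp then (x :: y :: g) :: gs
    else [x] :: (y :: g) :: gs
  | _ => [x] :: groups

-- prepend l onto the first group (l = already-accumulated prefix of that group)
def pvConsHead (l : List Int) : List (List Int) → List (List Int)
  | [] => [l]
  | g :: gs => (l ++ g) :: gs

theorem pvGetLastConcat {α : Type} [Inhabited α] (l : List α) (a : α) : (l ++ [a]).getLast! = a := by
  simp

-- the canonical form on x :: ys always starts with a group whose first element is x
theorem pvGrpHead (tp : List Int) (ys : List Int) (x : Int) :
    ∃ g gs, List.foldr (pvGrp tp) [] (x :: ys) = (x :: g) :: gs := by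
  induction ys generalizing x with
  | nil => exact ⟨[], [], rfl⟩
  | cons y ys ih =>
    obtain ⟨g, gs, hg⟩ := ih y
    simp only [List.foldr_cons] at hg ⊢
    rw [hg, pvGrp]
    split_ifs with h
    · exact ⟨y :: g, gs, rfl⟩
    · exact ⟨[], (y :: g) :: gs, rfl⟩

-- A's loop equals the canonical form
theorem pvMain (tp : List Int) (ys : List Int) (x : Int) (l : List Int) (gs : List (List Int)) :
    List.foldl (pvStepA tp) (gs ++ [l ++ [x]]) ((x :: ys).zip ys)
      = gs ++ pvConsHead l (List.foldr (pvGrp tp) [] (x :: ys)) := by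
  induction ys generalizing x l gs with
  | nil => simp [pvGrp, pvConsHead]
  | cons y ys ih =>
    obtain ⟨g, gs', hg⟩ := pvGrpHead tp ys y
    simp only [List.zip_cons_cons, List.foldl_cons, List.foldr_cons] at *
    rw [hg]
    by_cases h : y = x + 1 ∧ x ∈ tp ∧ y ∈ tp
    · have hstep : pvStepA tp (gs ++ [l ++ [x]]) (x, y) = gs ++ [(l ++ [x]) ++ [y]] := by
        simp only [pvStepA]; rw [if_pos h]; simp
      rw [hstep, ih y (l ++ [x]) gs, hg]
      simp only [pvGrp, if_pos h, pvConsHead]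
      simp
    · have hstep : pvStepA tp (gs ++ [l ++ [x]]) (x, y) = (gs ++ [l ++ [x]]) ++ [[] ++ [y]] := by
        simp only [pvStepA]; rw [if_neg h]; simp
      rw [hstep, ih y [] (gs ++ [l ++ [x]]), hg]
      simp only [pvGrp, if_neg h, pvConsHead]
      simp

-- B's reverse scan equals the canonical form (up to the two final reversals)
theorem pvRevEq (tp : List Int) (ys : List Int) :
    List.foldl (pvStepB tp) [] ys.reverse
      = ((List.foldr (pvGrp tp) [] ys).map (fun g => g.reverse)).reverse := by
  induction ys with
  | nil => rfl
  | cons x ys ih =>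
    rw [List.reverse_cons, List.foldl_append, ih]
    simp only [List.foldl_cons, List.foldl_nil, List.foldr_cons]
    match ys with
    | [] =>
      simp [pvStepB, pvGrp]
    | y :: ys' =>
      obtain ⟨g, gs, hg⟩ := pvGrpHead tp ys' y
      simp only [List.foldr_cons] at hg ⊢
      rw [hg]
      have hacc : (((y :: g) :: gs).map (fun g => g.reverse)).reverse
          = (gs.map (fun g => g.reverse)).reverse ++ [g.reverse ++ [y]] := by simp
      have hlast : ((gs.map (fun g => g.reverse)).reverse ++ [g.reverse ++ [y]]).getLast!
          = g.reverse ++ [y] := by simp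
      by_cases h : y = x + 1 ∧ x ∈ tp ∧ y ∈ tp
      · have hcond : ((gs.map (fun g => g.reverse)).reverse ++ [g.reverse ++ [y]]) ≠ [] ∧
            ((gs.map (fun g => g.reverse)).reverse ++ [g.reverse ++ [y]]).getLast!.getLast! = x + 1 ∧
            x ∈ tp ∧
            ((gs.map (fun g => g.reverse)).reverse ++ [g.reverse ++ [y]]).getLast!.getLast! ∈ tp := by
          refine ⟨by simp, ?_, h.2.1, ?_⟩
          · rw [hlast, pvGetLastConcat]; exact h.1
          · rw [hlast, pvGetLastConcat]; exact h.2.2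
        rw [hacc]
        simp only [pvStepB, if_pos hcond]
        simp only [pvGrp, if_pos h]
        simp
      · have hcond : ¬ (((gs.map (fun g => g.reverse)).reverse ++ [g.reverse ++ [y]]) ≠ [] ∧
            ((gs.map (fun g => g.reverse)).reverse ++ [g.reverse ++ [y]]).getLast!.getLast! = x + 1 ∧
            x ∈ tp ∧
            ((gs.map (fun g => g.reverse)).reverse ++ [g.reverse ++ [y]]).getLast!.getLast! ∈ tp) := by
          rw [hlast, pvGetLastConcat]
          intro hc
          exact h ⟨hc.2.1, hc.2.2.1, hc.2.2.2⟩
        rw [hacc]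
        simp only [pvStepB, if_neg hcond]
        simp only [pvGrp, if_neg h]
        simp

-- B equals the canonical form
theorem pvAltEq (tp : List Int) (cp : List Int) :
    group_pages_py_alt cp tp = List.foldr (pvGrp tp) [] cp := by
  unfold group_pages_py_alt
  rw [pvRevEq]
  simp [List.map_map]

-- ===== VERDICT (by name: the statement is the Claim_ definition above) =====
theorem group_pages_py_spec : Claim_equal_group_pages_py := by
  intro cp tp _
  unfold Spec_group_pages_py
  rw [pvAltEq]
  unfold group_pages_py
  match cp with
  | [] => rfl
  | x :: ys =>
    obtain ⟨g, gs, hg⟩ := pvGrpHead tp ys x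
    have hslice : PySem.List.slice (x :: ys) (some 1) none = ys := by
      simpa using PySem.List.slice_from_one (x :: ys)
    rw [hslice]
    have := pvMain tp ys x [] []
    simpa [hg, pvConsHead] using this
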